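-- pv_equiv track=rewrite | github.com/S-HEMANTH-REDDY/Hemanth_Reddy_Portfolio | ak.py | solution
-- ===== SOURCE A (Python) =====
-- def solution(points, tokens):
--     n = len(points)
--     total_points = 0
--
--     # Calculate points from token positions
--     for i in range(n):
--         if tokens[i] == 'T':
--             total_points += points[i]
--
--     # Calculate points from adjacent tokens
--     for i in range(n-1):
--         if tokens[i] == 'T' and tokens[i+1] == 'T':
--             total_points += 1
--
--     return total_points
-- ===== SOURCE B (Python) =====
-- def solution(points, tokens):
--     total = 0
--     prev_t = False
--     for i in range(len(points)):
--         cur = tokens[i] == 'T'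
--         if cur:
--             total += points[i]
--             if prev_t:
--                 total += 1
--         prev_t = cur
--     return total
-- ===== Notes on version B (the rewrite author's own statement) =====
-- stated objective: alternative
-- what changed: A makes two separate index loops (one summing points at 'T' positions, one re-reading tokens to count adjacent 'T','T' pairs); B is a single stateful pass that carries the previous token's flag and adds the pair bonus while summing.
import Mathlib
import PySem

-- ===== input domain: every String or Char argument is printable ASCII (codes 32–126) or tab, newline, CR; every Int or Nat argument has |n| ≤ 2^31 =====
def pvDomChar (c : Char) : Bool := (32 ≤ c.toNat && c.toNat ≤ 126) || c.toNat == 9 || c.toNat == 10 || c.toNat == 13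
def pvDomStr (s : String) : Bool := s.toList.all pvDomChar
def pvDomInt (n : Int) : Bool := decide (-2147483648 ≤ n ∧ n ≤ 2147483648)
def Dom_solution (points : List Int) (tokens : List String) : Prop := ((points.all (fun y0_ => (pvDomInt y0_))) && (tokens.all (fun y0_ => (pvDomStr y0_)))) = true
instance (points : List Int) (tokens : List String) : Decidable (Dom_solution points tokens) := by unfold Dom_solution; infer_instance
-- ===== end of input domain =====

-- B fuses A's two loops into a single pass carrying the previous token's flag; same cost, different decomposition.

-- ===== PORT A =====
-- body of A's first loop: if tokens[i] == 'T': total += points[i]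
def aBody1 (points : List Int) (tokens : List String) (total : Int) (i : Int) : Int :=
  if PySem.List.pyGetD tokens i "" = "T" then total + PySem.List.pyGetD points i 0 else total

-- body of A's second loop: if tokens[i] == 'T' and tokens[i+1] == 'T': total += 1
def aBody2 (tokens : List String) (total : Int) (i : Int) : Int :=
  if PySem.List.pyGetD tokens i "" = "T" ∧ PySem.List.pyGetD tokens (i + 1) "" = "T" then total + 1
  else total

def solution (points : List Int) (tokens : List String) : Int :=
  let n : Int := points.length
  let total₁ := (PySem.List.pyRange 0 n 1).foldl (aBody1 points tokens) 0
  (PySem.List.pyRange 0 (n - 1) 1).foldl (aBody2 tokens) total₁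

-- ===== PORT B =====
-- body of B's single loop; state = (total, prev_t)
def bBody (points : List Int) (tokens : List String) (st : Int × Bool) (i : Int) : Int × Bool :=
  let cur : Bool := decide (PySem.List.pyGetD tokens i "" = "T")
  if cur then (st.1 + PySem.List.pyGetD points i 0 + (if st.2 then 1 else 0), cur)
  else (st.1, cur)

def solution_alt (points : List Int) (tokens : List String) : Int :=
  ((PySem.List.pyRange 0 (points.length : Int) 1).foldl (bBody points tokens) (0, false)).1

-- ===== PRECONDITION & SPEC =====
-- Pre_ excludes exactly the inputs where Python A raises IndexError (tokens shorter than points); B raises there too.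
def Pre_solution (points : List Int) (tokens : List String) : Prop :=
  points.length ≤ tokens.length
instance (points : List Int) (tokens : List String) : Decidable (Pre_solution points tokens) := by
  unfold Pre_solution; infer_instance

def pvWitness_solution : List Int × List String := ([1, 2], ["T", "T"])

def Spec_solution (points : List Int) (tokens : List String) (out : Int) : Prop := out = solution_alt points tokens
instance (points : List Int) (tokens : List String) (out : Int) : Decidable (Spec_solution points tokens out) := by unfold Spec_solution; infer_instance

-- ===== CLAIM (what is proved, stated in full; the proofs are below) =====
def Claim_equal_solution : Prop := ∀ (points : List Int) (tokens : List String), Dom_solution points tokens → Pre_solution points tokens → Spec_solution points tokens (solution points tokens)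

-- ===== LEMMAS AND PROOFS =====

-- A's second-loop fold shifts with its initial accumulator
lemma aBody2_foldl_shift (tokens : List String) (l : List Int) (t c : Int) :
    l.foldl (aBody2 tokens) (t + c) = l.foldl (aBody2 tokens) t + c := by
  induction l generalizing t with
  | nil => rfl
  | cons x xs ih =>
      simp only [List.foldl_cons, aBody2]
      split_ifs with h
      · rw [show t + c + 1 = (t + 1) + c by ring, ih]
      · exact ih t

-- the single-pass invariant: B's state after m steps vs A's two folds up to m
lemma fused_invariant (points : List Int) (tokens : List String) (m : Nat) :
    ((PySem.List.pyRange 0 (m : Int) 1).foldl (bBody points tokens) (0, false)).1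
      = (PySem.List.pyRange 0 ((m : Int) - 1) 1).foldl (aBody2 tokens)
          ((PySem.List.pyRange 0 (m : Int) 1).foldl (aBody1 points tokens) 0)
    ∧ ((PySem.List.pyRange 0 (m : Int) 1).foldl (bBody points tokens) (0, false)).2
      = (decide (PySem.List.pyGetD tokens ((m : Int) - 1) "" = "T") && decide (0 < m)) := by
  induction m with
  | zero =>
      simp [PySem.List.pyRange_one_eq_nil]
  | succ m ih =>
      obtain ⟨ih1, ih2⟩ := ih
      have hm1 : ((m + 1 : Nat) : Int) = (m : Int) + 1 := by push_cast; ring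
      have hsplit : PySem.List.pyRange 0 ((m : Int) + 1) 1
          = PySem.List.pyRange 0 (m : Int) 1 ++ [(m : Int)] :=
        PySem.List.pyRange_one_succ_right (by positivity)
      have hB1 : ((PySem.List.pyRange 0 ((m : Int) + 1) 1).foldl (bBody points tokens) (0, false))
          = bBody points tokens
              ((PySem.List.pyRange 0 (m : Int) 1).foldl (bBody points tokens) (0, false)) (m : Int) := by
        rw [hsplit, List.foldl_append]; rfl
      have hF1 : (PySem.List.pyRange 0 ((m : Int) + 1) 1).foldl (aBody1 points tokens) 0
          = aBody1 points tokens
              ((PySem.List.pyRange 0 (m : Int) 1).foldl (aBody1 points tokens) 0) (m : Int) := by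
        rw [hsplit, List.foldl_append]; rfl
      rw [hm1, show (m : Int) + 1 - 1 = (m : Int) by ring, hB1, hF1]
      cases m with
      | zero =>
          simp only [Nat.cast_zero] at ih1 ih2 ⊢
          rw [PySem.List.pyRange_one_eq_nil (le_refl (0:Int))]
          simp only [List.foldl_nil, bBody, aBody1]
          by_cases h1 : PySem.List.pyGetD tokens 0 "" = "T" <;> simp [h1]
      | succ k =>
          have hk1 : ((k + 1 : Nat) : Int) = (k : Int) + 1 := by push_cast; ring
          have hsplit2 : PySem.List.pyRange 0 ((k : Int) + 1) 1
              = PySem.List.pyRange 0 (k : Int) 1 ++ [(k : Int)] :=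
            PySem.List.pyRange_one_succ_right (by positivity)
          rw [hk1] at ih1 ih2 ⊢
          rw [show (k : Int) + 1 - 1 = (k : Int) by ring] at ih1 ih2
          -- splitting A's second loop at its last index, for any initial accumulator
          have hsplitA2 : ∀ t : Int, (PySem.List.pyRange 0 ((k : Int) + 1) 1).foldl (aBody2 tokens) t
              = aBody2 tokens ((PySem.List.pyRange 0 (k : Int) 1).foldl (aBody2 tokens) t) (k : Int) := by
            intro t; rw [hsplit2, List.foldl_append]; rfl
          by_cases h1 : PySem.List.pyGetD tokens ((k : Int) + 1) "" = "T"
          · have hF1' : aBody1 points tokens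
                ((PySem.List.pyRange 0 ((k : Int) + 1) 1).foldl (aBody1 points tokens) 0) ((k : Int) + 1)
                = ((PySem.List.pyRange 0 ((k : Int) + 1) 1).foldl (aBody1 points tokens) 0)
                  + PySem.List.pyGetD points ((k : Int) + 1) 0 := by
              simp [aBody1, h1]
            rw [hF1',
              aBody2_foldl_shift tokens _ _ (PySem.List.pyGetD points ((k : Int) + 1) 0),
              hsplitA2, ← ih1]
            constructor
            · simp only [bBody, aBody2, h1, ih2]
              simp
              try split_ifs <;> ring
            · simp [bBody, h1]
          · have hF1' : aBody1 points tokens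
                ((PySem.List.pyRange 0 ((k : Int) + 1) 1).foldl (aBody1 points tokens) 0) ((k : Int) + 1)
                = (PySem.List.pyRange 0 ((k : Int) + 1) 1).foldl (aBody1 points tokens) 0 := by
              simp [aBody1, h1]
            rw [hF1', hsplitA2, ← ih1]
            constructor
            · simp [bBody, aBody2, h1]
            · simp [bBody, h1]

-- ===== VERDICT (by name: the statement is the Claim_ definition above) =====
theorem solution_spec : Claim_equal_solution := by
  intro points tokens _ _
  unfold Spec_solution solution solution_alt
  exact ((fused_invariant points tokens points.length).1).symm
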